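-- pv_equiv track=rewrite | github.com/5b521/hands | hands_functions/volumeControl.py | flagGenerator
-- ===== SOURCE A (Python) =====
-- def flagGenerator(sources: list):
--     '''
--     sources: list of lists containing only 0 and 1
--     '''
--     flag = 0
--     concat_list = []
--     for l in sources:
--         concat_list.extend(l)
--     for i in range(len(concat_list)):
--         flag += concat_list[i] * (2 ** i)
--     return flag
-- ===== SOURCE B (Python) =====
-- def flagGenerator(sources: list):
--     '''
--     sources: list of lists containing only 0 and 1
--     '''
--     # Horner's rule over the bits in reverse order: no 2**i powers,
--     # no intermediate concatenated list.
--     flag = 0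
--     for l in reversed(sources):
--         for bit in reversed(l):
--             flag = flag * 2 + bit
--     return flag
-- ===== Notes on version B (the rewrite author's own statement) =====
-- stated objective: faster
-- what changed: Replaces the concatenate-then-sum-of-positional-powers loop (flag += bit * 2**i) by a single reverse-order Horner accumulator (flag = flag*2 + bit) that never builds the concatenated list or computes a power.
import Mathlib
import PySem

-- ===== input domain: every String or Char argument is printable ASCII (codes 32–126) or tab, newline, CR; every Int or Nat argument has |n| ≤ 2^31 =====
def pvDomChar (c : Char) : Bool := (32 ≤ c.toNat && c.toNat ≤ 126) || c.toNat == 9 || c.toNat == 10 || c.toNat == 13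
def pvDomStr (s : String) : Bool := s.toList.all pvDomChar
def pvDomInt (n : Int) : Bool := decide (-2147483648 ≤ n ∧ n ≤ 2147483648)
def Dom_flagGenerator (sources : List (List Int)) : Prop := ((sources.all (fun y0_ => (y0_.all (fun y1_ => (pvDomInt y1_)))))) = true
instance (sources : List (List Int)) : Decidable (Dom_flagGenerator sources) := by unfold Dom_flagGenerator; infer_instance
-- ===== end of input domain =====

-- B replaces A's concatenate-then-sum-of-powers (bit * 2**i) by a reverse-order
-- Horner accumulator (flag = flag*2 + bit); equal return value on all inputs.

-- ===== PORT A =====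
def flagGenerator (sources : List (List Int)) : Int :=
  -- flag = 0; concat_list = []; for l in sources: concat_list.extend(l)
  let concat_list : List Int := sources.foldl (fun acc l => acc ++ l) []
  -- for i in range(len(concat_list)): flag += concat_list[i] * (2 ** i)
  (PySem.List.pyRange 0 (concat_list.length : Int) 1).foldl
    (fun flag i => flag + PySem.List.pyGetD concat_list i 0 * 2 ^ i.toNat) 0

-- ===== PORT B =====
def flagGenerator_alt (sources : List (List Int)) : Int :=
  sources.reverse.foldl
    (fun flag l => l.reverse.foldl (fun f b => f * 2 + b) flag) 0

-- ===== PRECONDITION & SPEC =====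
def Spec_flagGenerator (sources : List (List Int)) (out : Int) : Prop := out = flagGenerator_alt sources
instance (sources : List (List Int)) (out : Int) : Decidable (Spec_flagGenerator sources out) := by unfold Spec_flagGenerator; infer_instance

-- ===== CLAIM (what is proved, stated in full; the proofs are below) =====
def Claim_equal_flagGenerator : Prop := ∀ (sources : List (List Int)), Dom_flagGenerator sources → Spec_flagGenerator sources (flagGenerator sources)

-- ===== LEMMAS AND PROOFS =====

-- Σ xs[i] * 2^i, as a structural recursion: the common value of both ports.
def pvVal : List Int → Int
  | [] => 0
  | a :: t => a + 2 * pvVal t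

theorem pvVal_append_singleton (ys : List Int) (b : Int) :
    pvVal (ys ++ [b]) = pvVal ys + b * 2 ^ ys.length := by
  induction ys with
  | nil => simp [pvVal]
  | cons a t ih => simp [pvVal, ih, pow_succ]; ring

theorem pv_foldl_acc_append (acc : List Int) (ss : List (List Int)) :
    ss.foldl (fun a l => a ++ l) acc = acc ++ ss.flatten := by
  induction ss generalizing acc with
  | nil => simp
  | cons l t ih => simp [List.foldl_cons, ih]

theorem pv_horner_reverse (xs : List Int) (acc : Int) :
    xs.reverse.foldl (fun f b => f * 2 + b) acc = acc * 2 ^ xs.length + pvVal xs := by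
  induction xs generalizing acc with
  | nil => simp [pvVal]
  | cons a t ih =>
      simp [List.foldl_append, ih, pvVal, pow_succ]; ring

theorem pv_alt_flatten (ss : List (List Int)) (acc : Int) :
    ss.reverse.foldl (fun flag l => l.reverse.foldl (fun f b => f * 2 + b) flag) acc
      = ss.flatten.reverse.foldl (fun f b => f * 2 + b) acc := by
  induction ss generalizing acc with
  | nil => simp
  | cons l t ih =>
      rw [List.reverse_cons, List.foldl_append, ih, List.flatten_cons,
          List.reverse_append, List.foldl_append]
      simp

theorem pv_A_loop (xs : List Int) :
    (PySem.List.pyRange 0 (xs.length : Int) 1).foldl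
      (fun flag i => flag + PySem.List.pyGetD xs i 0 * 2 ^ i.toNat) 0 = pvVal xs := by
  induction xs using List.reverseRecOn with
  | nil => simp [PySem.List.pyRange_one_eq_nil, pvVal]
  | append_singleton ys b ih =>
      have hlen : ((ys ++ [b]).length : Int) = (ys.length : Int) + 1 := by simp
      rw [hlen, PySem.List.pyRange_one_succ_right (by positivity), List.foldl_append]
      have hcongr :
          (PySem.List.pyRange 0 (ys.length : Int) 1).foldl
            (fun flag i => flag + PySem.List.pyGetD (ys ++ [b]) i 0 * 2 ^ i.toNat) 0
          = (PySem.List.pyRange 0 (ys.length : Int) 1).foldl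
            (fun flag i => flag + PySem.List.pyGetD ys i 0 * 2 ^ i.toNat) 0 := by
        apply PySem.List.foldl_congr_mem
        intro acc x hx
        have hx' := (PySem.List.mem_pyRange_one).mp hx
        have h0 : 0 ≤ x := hx'.1
        have h1 : x < (ys.length : Int) := hx'.2
        have hxlt : x.toNat < ys.length := by omega
        simp only [PySem.List.pyGetD]
        rw [PySem.List.pyGet?_of_nonneg (ys ++ [b]) h0, PySem.List.pyGet?_of_nonneg ys h0,
            List.getElem?_append_left hxlt]
      rw [hcongr, ih]
      have hb : PySem.List.pyGetD (ys ++ [b]) (ys.length : Int) 0 = b := by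
        rw [PySem.List.pyGetD_natCast]
        simp [List.getD_eq_getElem?_getD]
      simp only [List.foldl_cons, List.foldl_nil]
      rw [hb, pvVal_append_singleton]
      simp

-- ===== VERDICT (by name: the statement is the Claim_ definition above) =====
theorem flagGenerator_spec : Claim_equal_flagGenerator := by
  intro sources _
  show flagGenerator sources = flagGenerator_alt sources
  unfold flagGenerator flagGenerator_alt
  rw [pv_alt_flatten, pv_horner_reverse]
  simp only [pv_foldl_acc_append, List.nil_append, pv_A_loop]
  ring
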